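-- pv_equiv track=rewrite | github.com/GeoffRiley/bitesofpy | !301-400/305/split_once.py | split_once
-- ===== SOURCE A (Python) =====
-- from typing import List
--
-- def split_once(text: str, separators: str = None) -> List[str]:
--     if separators is None:
--         separators = ' \t\n\r\v\f'
--     separators = set(separators)
--     res = []
--     pos = 0
--     start_pos = pos
--     while pos < len(text) and len(separators) > 0:
--         while pos < len(text) and text[pos] not in separators:
--             pos += 1
--         if pos < len(text):
--             separators.remove(text[pos])
--         res.append(text[start_pos:pos])
--         pos += 1
--         start_pos = pos
--     if len(res) == 0 or start_pos < len(text):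
--         res.append(text[start_pos:])
--     return res
-- ===== SOURCE B (Python) =====
-- from typing import List
--
--
-- def split_once(text: str, separators: str = None) -> List[str]:
--     if separators is None:
--         separators = ' \t\n\r\v\f'
--     remaining = set(separators)
--     cut_points = []
--     for i, ch in enumerate(text):
--         if not remaining:
--             break
--         if ch in remaining:
--             remaining.remove(ch)
--             cut_points.append(i)
--     res = []
--     start = 0
--     for i in cut_points:
--         res.append(text[start:i])
--         start = i + 1
--     if not res or start < len(text):
--         res.append(text[start:])
--     return res
-- ===== Notes on version B (the rewrite author's own statement) =====
-- stated objective: alternative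
-- what changed: Replaces A's nested scan-and-slice while-loop (which mutates pos/start_pos in lockstep) by two independent passes: one enumerate pass recording the cut indices into a list while consuming separators, then a separate slicing pass over that index table.
import Mathlib
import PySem

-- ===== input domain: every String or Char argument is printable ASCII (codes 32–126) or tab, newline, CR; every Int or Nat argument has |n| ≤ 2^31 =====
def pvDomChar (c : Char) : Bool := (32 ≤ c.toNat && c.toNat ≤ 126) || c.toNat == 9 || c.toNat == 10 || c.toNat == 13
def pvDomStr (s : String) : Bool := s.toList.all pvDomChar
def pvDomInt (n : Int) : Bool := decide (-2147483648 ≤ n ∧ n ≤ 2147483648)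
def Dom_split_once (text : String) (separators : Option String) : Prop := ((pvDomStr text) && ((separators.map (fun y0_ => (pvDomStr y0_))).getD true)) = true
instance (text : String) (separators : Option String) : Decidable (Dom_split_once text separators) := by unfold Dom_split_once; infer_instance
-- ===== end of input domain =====

-- B re-implements A's nested scan-and-slice loop as two passes (cut-index table, then slicing); same return value, no side effects.

-- default separators ' \t\n\r\v\f'
def pvDefaultSeps : List Char := [' ', '\t', '\n', '\r', Char.ofNat 11, Char.ofNat 12]

-- ===== PORT A =====
-- inner `while pos < len(text) and text[pos] not in separators: pos += 1`, returning the final pos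
def pvScanA (cs : List Char) (seps : PySem.Set Char) (pos : Nat) : Nat :=
  if h : pos < cs.length then
    if PySem.Set.contains seps cs[pos] then pos else pvScanA cs seps (pos + 1)
  else pos
termination_by cs.length - pos

theorem pvScanA_ge (cs : List Char) (seps : PySem.Set Char) (pos : Nat) :
    pos ≤ pvScanA cs seps pos := by
  fun_induction pvScanA with
  | case1 => omega
  | case2 pos h hc ih => omega
  | case3 => omega

-- outer while loop; A keeps pos = start_pos at every loop head, so one counter suffices to
-- transcribe it except in the tail step, where A sets pos = start_pos = p+1 and re-tests;
-- returns (res, start_pos).  `remove` on a just-found member = discard.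
def pvLoopA (cs : List Char) (seps : PySem.Set Char) (res : List (List Char)) (pos : Nat) :
    List (List Char) × Nat :=
  if hlt : pos < cs.length ∧ seps ≠ [] then
    pvLoopA cs
      (if h : pvScanA cs seps pos < cs.length then
        PySem.Set.discard seps cs[pvScanA cs seps pos] else seps)
      (res ++ [(cs.drop pos).take (pvScanA cs seps pos - pos)]) (pvScanA cs seps pos + 1)
  else (res, pos)
termination_by cs.length + 1 - pos
decreasing_by
  have := pvScanA_ge cs seps pos
  omega

-- `if len(res) == 0 or start_pos < len(text): res.append(text[start_pos:])`
def pvFinish (cs : List Char) (rs : List (List Char) × Nat) : List (List Char) :=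
  if rs.1 = [] ∨ rs.2 < cs.length then rs.1 ++ [cs.drop rs.2] else rs.1

def split_once (text : String) (separators : Option String) : List String :=
  let sepcs := match separators with | none => pvDefaultSeps | some s => s.toList
  let cs := text.toList
  (pvFinish cs (pvLoopA cs (PySem.Set.ofList sepcs) [] 0)).map String.ofList

-- ===== PORT B =====
-- first pass: cut-point indices (enumerate with break once `remaining` is empty)
def pvCutsB (cs : List Char) (i : Nat) (remaining : PySem.Set Char) : List Nat :=
  match cs with
  | [] => []
  | c :: rest =>
    if remaining = [] then []
    else if PySem.Set.contains remaining c then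
      i :: pvCutsB rest (i + 1) (PySem.Set.discard remaining c)
    else pvCutsB rest (i + 1) remaining

-- second pass: `for i in cut_points: res.append(text[start:i]); start = i + 1`
def pvStepB (cs : List Char) (acc : List (List Char) × Nat) (i : Nat) : List (List Char) × Nat :=
  (acc.1 ++ [(cs.drop acc.2).take (i - acc.2)], i + 1)

def split_once_alt (text : String) (separators : Option String) : List String :=
  let sepcs := match separators with | none => pvDefaultSeps | some s => s.toList
  let cs := text.toList
  let cps := pvCutsB cs 0 (PySem.Set.ofList sepcs)
  (pvFinish cs (cps.foldl (pvStepB cs) ([], 0))).map String.ofList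

-- ===== PRECONDITION & SPEC =====
def Spec_split_once (text : String) (separators : Option String) (out : List String) : Prop := out = split_once_alt text separators
instance (text : String) (separators : Option String) (out : List String) : Decidable (Spec_split_once text separators out) := by unfold Spec_split_once; infer_instance

-- ===== CLAIM (what is proved, stated in full; the proofs are below) =====
def Claim_equal_split_once : Prop := ∀ (text : String) (separators : Option String), Dom_split_once text separators → Spec_split_once text separators (split_once text separators)

-- ===== LEMMAS AND PROOFS =====

theorem pvScanA_le (cs : List Char) (seps : PySem.Set Char) (pos : Nat) (h : pos ≤ cs.length) :
    pvScanA cs seps pos ≤ cs.length := by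
  fun_induction pvScanA with
  | case1 pos h hc => omega
  | case2 pos h hc ih => exact ih (by omega)
  | case3 pos h => omega

theorem pvCutsB_nil_seps (cs : List Char) (i : Nat) : pvCutsB cs i [] = [] := by
  cases cs <;> simp [pvCutsB]

theorem pvCuts_scan (cs : List Char) (seps : PySem.Set Char) (pos : Nat)
    (hpos : pos ≤ cs.length) (hne : seps ≠ []) :
    pvCutsB (cs.drop pos) pos seps =
      (if h : pvScanA cs seps pos < cs.length then
        pvScanA cs seps pos ::
          pvCutsB (cs.drop (pvScanA cs seps pos + 1)) (pvScanA cs seps pos + 1)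
            (PySem.Set.discard seps cs[pvScanA cs seps pos])
       else []) := by
  fun_induction pvScanA cs seps pos with
  | case1 pos h hc =>
    have hm : cs[pos] ∈ seps := by simpa using hc
    rw [dif_pos h, ← List.getElem_cons_drop h]
    simp [pvCutsB, hne, hm]
  | case2 pos h hc ih =>
    have hm : cs[pos] ∉ seps := by simpa using hc
    rw [← List.getElem_cons_drop h]
    simp only [pvCutsB, if_neg hne, if_neg hc]
    exact ih (by omega)
  | case3 pos h =>
    have hpl : pos = cs.length := by omega
    rw [dif_neg h]
    simp [hpl, pvCutsB]

theorem pvMain (cs : List Char) (n : Nat) : ∀ (pos : Nat) (seps : PySem.Set Char)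
    (res : List (List Char)), cs.length - pos ≤ n → pos ≤ cs.length →
    pvFinish cs (pvLoopA cs seps res pos) =
      pvFinish cs ((pvCutsB (cs.drop pos) pos seps).foldl (pvStepB cs) (res, pos)) := by
  induction n with
  | zero =>
    intro pos seps res hn hle
    have hpos : pos = cs.length := by omega
    rw [pvLoopA, dif_neg (by omega : ¬ (pos < cs.length ∧ seps ≠ []))]
    simp [hpos, pvCutsB]
  | succ n ih =>
    intro pos seps res hn hle
    by_cases hp : pos < cs.length
    · by_cases hs : seps = []
      · rw [pvLoopA, dif_neg (by simp [hs] : ¬ (pos < cs.length ∧ seps ≠ [])), hs,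
          pvCutsB_nil_seps]
        rfl
      · rw [pvCuts_scan cs seps pos hle hs, pvLoopA, dif_pos (And.intro hp hs)]
        set p := pvScanA cs seps pos with hpdef
        have hple : p ≤ cs.length := pvScanA_le cs seps pos hle
        have hpge : pos ≤ p := pvScanA_ge cs seps pos
        by_cases h : p < cs.length
        · rw [dif_pos h, dif_pos h, List.foldl_cons]
          have := ih (p + 1) (PySem.Set.discard seps cs[p])
            (res ++ [(cs.drop pos).take (p - pos)]) (by omega) (by omega)
          rw [this]
          rfl
        · -- scan reached the end: A appends the tail inside the loop and leaves
          -- start_pos = len+1; B appends the same tail in pvFinish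
          have hpl : p = cs.length := by omega
          rw [dif_neg h, dif_neg h, List.foldl_nil, pvLoopA,
            dif_neg (by omega : ¬ (p + 1 < cs.length ∧ seps ≠ []))]
          have htake : (cs.drop pos).take (p - pos) = cs.drop pos := by
            apply List.take_of_length_le
            simp [hpl]
          unfold pvFinish
          simp only
          rw [if_neg (by simp; omega), if_pos (Or.inr hp), htake]
    · have hpos : pos = cs.length := by omega
      rw [pvLoopA, dif_neg (by omega : ¬ (pos < cs.length ∧ seps ≠ []))]
      simp [hpos, pvCutsB]

-- ===== VERDICT (by name: the statement is the Claim_ definition above) =====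
theorem split_once_spec : Claim_equal_split_once := by
  intro text separators _
  show _ = _
  unfold split_once split_once_alt
  simp only
  rw [pvMain text.toList text.toList.length 0 _ [] (by omega) (by omega)]
  rfl
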